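-- pv_equiv track=rewrite | github.com/HcxoAlbus/CodeWise | backend/utils/text_processor.py | clean_code
-- ===== SOURCE A (Python) =====
-- def clean_code(code: str) -> str:
--     """
--     清理代码文本
--
--     Args:
--         code: 原始代码
--
--     Returns:
--         清理后的代码
--     """
--     if not code:
--         return ""
--
--     # 移除多余的空行
--     lines = code.split('\n')
--     cleaned_lines = []
--
--     for line in lines:
--         # 保留有内容的行和必要的空行
--         if line.strip() or (cleaned_lines and cleaned_lines[-1].strip()):
--             cleaned_lines.append(line.rstrip())
--
--     # 移除末尾的空行
--     while cleaned_lines and not cleaned_lines[-1].strip():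
--         cleaned_lines.pop()
--
--     return '\n'.join(cleaned_lines)
-- ===== SOURCE B (Python) =====
-- def clean_code(code: str) -> str:
--     if not code:
--         return ""
--     # Group non-blank (rstripped) lines into paragraphs, then join paragraphs
--     # with a single blank line; leading/trailing blank runs vanish naturally.
--     blocks = []
--     cur = []
--     for line in code.split('\n'):
--         line = line.rstrip()
--         if line:
--             cur.append(line)
--         elif cur:
--             blocks.append(cur)
--             cur = []
--     if cur:
--         blocks.append(cur)
--     return '\n\n'.join('\n'.join(b) for b in blocks)
-- ===== Notes on version B (the rewrite author's own statement) =====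
-- stated objective: alternative
-- what changed: B groups the rstripped non-blank lines into paragraph blocks in one pass and joins the blocks with a single blank separator line, instead of A's append-with-lookback filter followed by a trailing pop-while loop.
import Mathlib
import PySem

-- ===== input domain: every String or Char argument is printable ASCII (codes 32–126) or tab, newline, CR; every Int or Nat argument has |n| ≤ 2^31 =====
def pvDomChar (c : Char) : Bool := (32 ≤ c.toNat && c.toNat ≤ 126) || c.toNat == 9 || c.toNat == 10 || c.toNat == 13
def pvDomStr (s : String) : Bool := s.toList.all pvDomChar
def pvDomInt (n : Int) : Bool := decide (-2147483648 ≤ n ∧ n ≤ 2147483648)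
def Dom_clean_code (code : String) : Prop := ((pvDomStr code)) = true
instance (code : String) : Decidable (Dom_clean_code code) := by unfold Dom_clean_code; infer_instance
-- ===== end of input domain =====

-- B rebuilds the text from paragraph blocks joined by one blank line each, in one pass (alternative decomposition, same cost); A filters with a lookback then pops trailing blanks.

-- ===== PORT A =====
-- loop body: append iff the line is non-blank, or the previously kept line is non-blank
def stepA (acc : List (List Char)) (line : List Char) : List (List Char) :=
  if PySem.Chars.strip line ≠ [] ∨
     (acc ≠ [] ∧ PySem.Chars.strip ((PySem.List.pyGet? acc (-1)).getD []) ≠ []) then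
    acc ++ [PySem.Chars.rstrip line]
  else acc

def cleanFoldA (lines : List (List Char)) : List (List Char) :=
  lines.foldl stepA []

-- the trailing 'while cleaned_lines and not cleaned_lines[-1].strip(): pop()' loop
def popTrailA (xs : List (List Char)) : List (List Char) :=
  (xs.reverse.dropWhile (fun l => PySem.Chars.strip l == [])).reverse

def clean_code (code : String) : String :=
  if code = "" then ""
  else
    String.ofList (PySem.Chars.join ['\n'] (popTrailA (cleanFoldA (PySem.Chars.splitOn code.toList ['\n']))))

-- ===== PORT B =====
-- one pass: collect maximal runs of non-blank rstripped lines into blocks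
def blockStepB (st : List (List (List Char)) × List (List Char)) (line : List Char) :
    List (List (List Char)) × List (List Char) :=
  let l := PySem.Chars.rstrip line
  if l ≠ [] then (st.1, st.2 ++ [l])
  else if st.2 ≠ [] then (st.1 ++ [st.2], [])
  else st

def clean_code_alt (code : String) : String :=
  if code = "" then ""
  else
    let st := (PySem.Chars.splitOn code.toList ['\n']).foldl blockStepB ([], [])
    let blocks := if st.2 ≠ [] then st.1 ++ [st.2] else st.1
    String.ofList (PySem.Chars.join ['\n', '\n'] (blocks.map (PySem.Chars.join ['\n'])))

-- ===== PRECONDITION & SPEC =====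
def Spec_clean_code (code : String) (out : String) : Prop := out = clean_code_alt code
instance (code : String) (out : String) : Decidable (Spec_clean_code code out) := by unfold Spec_clean_code; infer_instance

-- ===== CLAIM (what is proved, stated in full; the proofs are below) =====
def Claim_equal_clean_code : Prop := ∀ (code : String), Dom_clean_code code → Spec_clean_code code (clean_code code)

-- ===== LEMMAS AND PROOFS =====

-- blank-line characterisations: strip/rstrip give [] exactly on all-whitespace strings
theorem rstrip_eq_nil_iff (l : List Char) :
    PySem.Chars.rstrip l = [] ↔ ∀ c ∈ l, PySem.Chars.isspace c = true := by
  simp [PySem.Chars.rstrip, List.dropWhile_eq_nil_iff]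

theorem lstrip_allsp (l : List Char) :
    (∀ c ∈ PySem.Chars.lstrip l, PySem.Chars.isspace c = true) ↔
    (∀ c ∈ l, PySem.Chars.isspace c = true) := by
  constructor
  · intro h c hc
    rcases List.mem_append.1 (by rw [List.takeWhile_append_dropWhile (p := PySem.Chars.isspace)]; exact hc) with h' | h'
    · exact List.mem_takeWhile_imp h'
    · exact h c h'
  · intro h c hc
    exact h c ((List.dropWhile_sublist _).mem hc)

theorem strip_eq_nil_iff (l : List Char) :
    PySem.Chars.strip l = [] ↔ ∀ c ∈ l, PySem.Chars.isspace c = true := by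
  rw [PySem.Chars.strip, rstrip_eq_nil_iff, lstrip_allsp]

theorem allsp_rstrip (l : List Char) :
    (∀ c ∈ PySem.Chars.rstrip l, PySem.Chars.isspace c = true) ↔
    (∀ c ∈ l, PySem.Chars.isspace c = true) := by
  constructor
  · intro h c hc
    have hc' : c ∈ l.reverse := List.mem_reverse.2 hc
    rcases List.mem_append.1 (by rw [List.takeWhile_append_dropWhile (p := PySem.Chars.isspace)]; exact hc') with h' | h'
    · exact List.mem_takeWhile_imp h'
    · exact h c (by simp [PySem.Chars.rstrip, h'])
  · intro h c hc
    simp only [PySem.Chars.rstrip, List.mem_reverse] at hc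
    exact h c (List.mem_reverse.1 ((List.dropWhile_sublist _).mem hc))

theorem strip_ne_of_rstrip_ne (l : List Char) (h : PySem.Chars.rstrip l ≠ []) :
    PySem.Chars.strip l ≠ [] := fun h' => h ((rstrip_eq_nil_iff l).2 ((strip_eq_nil_iff l).1 h'))

theorem strip_eq_of_rstrip_eq (l : List Char) (h : PySem.Chars.rstrip l = []) :
    PySem.Chars.strip l = [] := (strip_eq_nil_iff l).2 ((rstrip_eq_nil_iff l).1 h)

theorem strip_rstrip_ne (l : List Char) (h : PySem.Chars.rstrip l ≠ []) :
    PySem.Chars.strip (PySem.Chars.rstrip l) ≠ [] := by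
  intro h'
  exact h ((rstrip_eq_nil_iff l).2 ((allsp_rstrip l).1 ((strip_eq_nil_iff _).1 h')))

-- negative-index last element
theorem pyGetLast (xs : List (List Char)) (x : List Char) :
    (PySem.List.pyGet? (xs ++ [x]) (-1)).getD [] = x := by
  simp [PySem.List.pyGet?, PySem.List.pyIdx?]

-- A's accumulator as a function of B's state: flushed blocks each followed by one blank line, then the open block
def encA (blocks : List (List (List Char))) (cur : List (List Char)) : List (List Char) :=
  (blocks.map (fun b => b ++ [([] : List Char)])).flatten ++ cur

theorem fold_inv (L : List (List Char)) : ∀ (blocks : List (List (List Char))) (cur : List (List Char)),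
    (∀ b ∈ blocks, b ≠ [] ∧ ∀ x ∈ b, PySem.Chars.strip x ≠ []) →
    (∀ x ∈ cur, PySem.Chars.strip x ≠ []) →
    L.foldl stepA (encA blocks cur) =
      encA (L.foldl blockStepB (blocks, cur)).1 (L.foldl blockStepB (blocks, cur)).2
    ∧ (∀ b ∈ (L.foldl blockStepB (blocks, cur)).1, b ≠ [] ∧ ∀ x ∈ b, PySem.Chars.strip x ≠ [])
    ∧ (∀ x ∈ (L.foldl blockStepB (blocks, cur)).2, PySem.Chars.strip x ≠ []) := by
  induction L with
  | nil => intro blocks cur hb hc; exact ⟨rfl, hb, hc⟩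
  | cons line rest ih =>
    intro blocks cur hb hc
    by_cases h : PySem.Chars.rstrip line = []
    · have hs : PySem.Chars.strip line = [] := strip_eq_of_rstrip_eq line h
      by_cases hcur : cur = []
      · subst hcur
        have hB : blockStepB (blocks, []) line = (blocks, []) := by
          simp [blockStepB, h]
        have hA : stepA (encA blocks []) line = encA blocks [] := by
          unfold stepA
          rw [if_neg]
          rintro (hP | ⟨hne, hlast⟩)
          · exact hP hs
          · rcases List.eq_nil_or_concat blocks with h0 | ⟨bs, b, h0⟩
            · exact hne (by simp [encA, h0])
            · have he : encA blocks [] = ((bs.map (fun b => b ++ [([] : List Char)])).flatten ++ b) ++ [[]] := by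
                simp [encA, h0]
              rw [he, pyGetLast] at hlast
              exact hlast (by simp [PySem.Chars.strip, PySem.Chars.lstrip, PySem.Chars.rstrip])
        simpa [List.foldl_cons, hA, hB] using ih blocks [] hb hc
      · rcases List.eq_nil_or_concat cur with h0 | ⟨c', x, h0⟩
        · exact absurd h0 hcur
        have hB : blockStepB (blocks, cur) line = (blocks ++ [cur], []) := by
          simp [blockStepB, h, hcur]
        have hx : PySem.Chars.strip x ≠ [] := hc x (by simp [h0])
        have hA : stepA (encA blocks cur) line = encA (blocks ++ [cur]) [] := by
          unfold stepA
          rw [if_pos]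
          · rw [h]
            simp [encA, List.flatten_append, h0]
          · right
            constructor
            · simp [encA, h0]
            · have : encA blocks cur =
                  ((blocks.map (fun b => b ++ [([] : List Char)])).flatten ++ c') ++ [x] := by
                simp [encA, h0]
              rw [this, pyGetLast]; exact hx
        have hb' : ∀ b ∈ blocks ++ [cur], b ≠ [] ∧ ∀ x ∈ b, PySem.Chars.strip x ≠ [] := by
          intro b hbmem
          rcases List.mem_append.1 hbmem with h' | h'
          · exact hb b h'
          · simp only [List.mem_singleton] at h'; subst h'; exact ⟨hcur, hc⟩
        simpa [List.foldl_cons, hA, hB] using ih (blocks ++ [cur]) [] hb' (by simp)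
    · have hs : PySem.Chars.strip line ≠ [] := strip_ne_of_rstrip_ne line h
      have hB : blockStepB (blocks, cur) line = (blocks, cur ++ [PySem.Chars.rstrip line]) := by
        simp [blockStepB, h]
      have hA : stepA (encA blocks cur) line = encA blocks (cur ++ [PySem.Chars.rstrip line]) := by
        unfold stepA
        rw [if_pos (Or.inl hs)]
        simp [encA]
      have hc' : ∀ x ∈ cur ++ [PySem.Chars.rstrip line], PySem.Chars.strip x ≠ [] := by
        intro x hx
        rcases List.mem_append.1 hx with h' | h'
        · exact hc x h'
        · simp only [List.mem_singleton] at h'; subst h'; exact strip_rstrip_ne line h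
      simpa [List.foldl_cons, hA, hB] using ih blocks (cur ++ [PySem.Chars.rstrip line]) hb hc'

theorem popTrail_concat_ne (ys : List (List Char)) (x : List Char) (hx : PySem.Chars.strip x ≠ []) :
    popTrailA (ys ++ [x]) = ys ++ [x] := by
  unfold popTrailA
  rw [List.reverse_append, List.reverse_singleton, List.singleton_append,
      List.dropWhile_cons_of_neg (by simpa using hx)]
  simp

theorem popTrail_concat_nil (ys : List (List Char)) :
    popTrailA (ys ++ [([] : List Char)]) = popTrailA ys := by
  unfold popTrailA
  rw [List.reverse_append, List.reverse_singleton, List.singleton_append,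
      List.dropWhile_cons_of_pos]
  simp [PySem.Chars.strip, PySem.Chars.lstrip, PySem.Chars.rstrip]

theorem join_append_cons (sep : List Char) (xs : List (List Char)) (y : List Char)
    (ys : List (List Char)) (hxs : xs ≠ []) :
    PySem.Chars.join sep (xs ++ y :: ys) =
      PySem.Chars.join sep xs ++ sep ++ PySem.Chars.join sep (y :: ys) := by
  induction xs with
  | nil => exact absurd rfl hxs
  | cons a xs ih =>
    cases xs with
    | nil => simp [PySem.Chars.join_cons_cons, PySem.Chars.join_singleton]
    | cons b xs' =>
      rw [List.cons_append, List.cons_append, PySem.Chars.join_cons_cons,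
          ← List.cons_append, ih (by simp), PySem.Chars.join_cons_cons]
      simp

theorem joinBlocks (blocks : List (List (List Char))) : ∀ (cur : List (List Char)),
    (∀ b ∈ blocks, b ≠ []) → cur ≠ [] →
    PySem.Chars.join ['\n'] (encA blocks cur) =
      PySem.Chars.join ['\n', '\n'] ((blocks ++ [cur]).map (PySem.Chars.join ['\n'])) := by
  induction blocks with
  | nil =>
    intro cur _ _
    simp [encA, PySem.Chars.join_singleton]
  | cons b bs ih =>
    intro cur hb hcur
    have hb' : b ≠ [] := (hb b (by simp))
    have henc : encA (b :: bs) cur = b ++ ([] : List Char) :: encA bs cur := by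
      simp [encA]
    have hne : encA bs cur ≠ [] := by
      simp only [encA]
      intro h
      exact hcur (List.append_eq_nil_iff.1 h).2
    obtain ⟨z, zs, hz⟩ := List.exists_cons_of_ne_nil hne
    rw [henc, join_append_cons _ b _ _ hb', hz, PySem.Chars.join_cons_cons, ← hz,
        ih cur (fun b hbm => hb b (by simp [hbm])) hcur]
    have : ((b :: bs) ++ [cur]).map (PySem.Chars.join ['\n']) =
        PySem.Chars.join ['\n'] b :: ((bs ++ [cur]).map (PySem.Chars.join ['\n'])) := by simp
    rw [this]
    obtain ⟨w, ws, hw⟩ := List.exists_cons_of_ne_nil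
      (show (bs ++ [cur]).map (PySem.Chars.join ['\n']) ≠ [] by simp)
    rw [hw, PySem.Chars.join_cons_cons, ← hw]
    simp

theorem clean_code_key (L : List (List Char)) :
    PySem.Chars.join ['\n'] (popTrailA (cleanFoldA L)) =
    (let st := L.foldl blockStepB ([], [])
     let blocks := if st.2 ≠ [] then st.1 ++ [st.2] else st.1
     PySem.Chars.join ['\n', '\n'] (blocks.map (PySem.Chars.join ['\n']))) := by
  obtain ⟨heq, hb, hc⟩ := fold_inv L [] [] (by simp) (by simp)
  have h0 : cleanFoldA L = encA (L.foldl blockStepB ([], [])).1 (L.foldl blockStepB ([], [])).2 := by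
    simpa [cleanFoldA, encA] using heq
  set st := L.foldl blockStepB ([], []) with hst
  by_cases h2 : st.2 = []
  · simp only [h2, ne_eq, not_true_eq_false]
    rcases List.eq_nil_or_concat st.1 with h1 | ⟨bs, b, h1⟩
    · simp [h0, h1, h2, encA, popTrailA, PySem.Chars.join_nil]
    · have hbne : b ≠ [] := (hb b (by simp [h1])).1
      have hbx : ∀ x ∈ b, PySem.Chars.strip x ≠ [] := (hb b (by simp [h1])).2
      obtain ⟨b', x, hbx'⟩ := (List.eq_nil_or_concat b).resolve_left hbne
      have henc : encA st.1 st.2 =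
          (((bs.map (fun b => b ++ [([] : List Char)])).flatten ++ b') ++ [x]) ++ [[]] := by
        simp [encA, h1, h2, hbx', List.flatten_append]
      rw [h0, henc, popTrail_concat_nil,
          popTrail_concat_ne _ x (hbx x (by simp [hbx']))]
      have : (bs.map (fun b => b ++ [([] : List Char)])).flatten ++ b' ++ [x] = encA bs b := by
        simp [encA, hbx']
      rw [this, joinBlocks bs b (fun c hcm => (hb c (by simp [h1, hcm])).1) hbne, h1, List.concat_eq_append]
      simp
  · simp only [h2, ne_eq, not_false_eq_true, if_pos]
    obtain ⟨c', x, hcx⟩ := (List.eq_nil_or_concat st.2).resolve_left h2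
    have henc : encA st.1 st.2 =
        (((st.1.map (fun b => b ++ [([] : List Char)])).flatten) ++ c') ++ [x] := by
      simp [encA, hcx]
    rw [h0, henc, popTrail_concat_ne _ x (hc x (by simp [hcx]))]
    have : ((st.1.map (fun b => b ++ [([] : List Char)])).flatten) ++ c' ++ [x] = encA st.1 st.2 := by
      simp [encA, hcx]
    rw [this, joinBlocks st.1 st.2 (fun b hbm => (hb b hbm).1) h2]

-- ===== VERDICT (by name: the statement is the Claim_ definition above) =====
theorem clean_code_spec : Claim_equal_clean_code := by
  intro code _
  unfold Spec_clean_code clean_code clean_code_alt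
  by_cases h : code = ""
  · simp [h]
  · simp only [if_neg h]
    exact congrArg String.ofList (clean_code_key _)
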